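-- pv_equiv track=rewrite | github.com/Sh3B0/Automatic-Timetable-Creation | Table/Scheduler/Logic/src/algorithm.py | disjoint
-- ===== SOURCE A (Python) =====
-- def disjoint(a, b):
--     """
--     :param a: 1st target list
--     :param b: 2nd target list
--     :return: True if given two lists are disjoint, false otherwise
--     """
--     for t1 in a:
--         for t2 in b:
--             if t1[0] == t2[0]:
--                 if (t1[1] == '**' or t2[1] == '**') and t1[0] != 'B19':
--                     return False
--                 elif t1[1] == t2[1]:
--                     if t1[2] == '**' or t2[2] == '**':
--                         return False
--                     elif t1[2] == t2[2]:
--                         return False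
--     return True
-- ===== SOURCE B (Python) =====
-- def disjoint(a, b):
--     """
--     :param a: 1st target list
--     :param b: 2nd target list
--     :return: True if given two lists are disjoint, false otherwise
--     """
--     keys = {t[0] for t in b}
--     wild1 = {t[0] for t in b if t[1] == '**'}
--     pairs1 = {(t[0], t[1]) for t in b}
--     wild2 = {(t[0], t[1]) for t in b if t[2] == '**'}
--     pairs12 = {(t[0], t[1], t[2]) for t in b}
--     for f0, f1, f2 in a:
--         if f0 in keys and f0 != 'B19' and (f1 == '**' or f0 in wild1):
--             return False
--         if (f0, f1) in pairs1 and (f2 == '**' or (f0, f1) in wild2 or (f0, f1, f2) in pairs12):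
--             return False
--     return True
-- ===== Notes on version B (the rewrite author's own statement) =====
-- stated objective: faster
-- what changed: Replaces the O(n*m) nested pairwise scan by indexing b once into hash sets (keys, wildcard flags, (field0,field1) pairs, full triples) and testing each element of a with O(1) set lookups.
import Mathlib
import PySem

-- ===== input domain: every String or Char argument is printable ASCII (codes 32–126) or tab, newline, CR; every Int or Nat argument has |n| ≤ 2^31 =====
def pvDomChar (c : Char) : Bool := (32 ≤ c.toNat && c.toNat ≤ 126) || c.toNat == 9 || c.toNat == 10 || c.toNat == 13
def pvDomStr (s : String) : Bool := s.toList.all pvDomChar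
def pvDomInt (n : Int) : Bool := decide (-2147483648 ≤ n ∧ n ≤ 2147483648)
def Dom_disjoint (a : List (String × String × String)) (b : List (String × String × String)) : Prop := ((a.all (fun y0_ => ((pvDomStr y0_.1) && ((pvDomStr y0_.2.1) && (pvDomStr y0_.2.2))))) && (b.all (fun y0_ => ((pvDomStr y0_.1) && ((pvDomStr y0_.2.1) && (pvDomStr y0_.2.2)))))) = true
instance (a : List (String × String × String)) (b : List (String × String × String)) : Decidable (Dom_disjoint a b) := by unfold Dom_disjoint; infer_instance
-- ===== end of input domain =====

-- B indexes b once into hash sets and tests each element of a with O(1) lookups,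
-- replacing A's nested pairwise scan (objective: faster, asymptotic).

-- ===== PORT A =====
-- inner 'for t2 in b' loop of A, with its early 'return False' (false = conflict found)
def disjointInner (t1 : String × String × String) : List (String × String × String) → Bool
  | [] => true
  | t2 :: bs =>
    if t1.1 == t2.1 then
      if (t1.2.1 == "**" || t2.2.1 == "**") && t1.1 != "B19" then false
      else if t1.2.1 == t2.2.1 then
        if t1.2.2 == "**" || t2.2.2 == "**" then false
        else if t1.2.2 == t2.2.2 then false
        else disjointInner t1 bs
      else disjointInner t1 bs
    else disjointInner t1 bs

def disjoint (a : List (String × String × String)) (b : List (String × String × String)) : Bool :=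
  match a with
  | [] => true
  | t1 :: as_ => if disjointInner t1 b then disjoint as_ b else false

-- ===== PORT B =====
-- the 'for f0, f1, f2 in a' loop of Source B, with the prebuilt sets
def disjointAltGo (keys wild1 : PySem.Set String) (pairs1 wild2 : PySem.Set (String × String))
    (pairs12 : PySem.Set (String × String × String)) :
    List (String × String × String) → Bool
  | [] => true
  | (f0, f1, f2) :: as_ =>
    if PySem.Set.contains keys f0 && f0 != "B19" && (f1 == "**" || PySem.Set.contains wild1 f0) then
      false
    else if PySem.Set.contains pairs1 (f0, f1) &&
        (f2 == "**" || PySem.Set.contains wild2 (f0, f1) || PySem.Set.contains pairs12 (f0, f1, f2)) then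
      false
    else disjointAltGo keys wild1 pairs1 wild2 pairs12 as_

def disjoint_alt (a : List (String × String × String)) (b : List (String × String × String)) : Bool :=
  let keys := PySem.Set.ofList (b.map (fun t => t.1))
  let wild1 := PySem.Set.ofList ((b.filter (fun t => t.2.1 == "**")).map (fun t => t.1))
  let pairs1 := PySem.Set.ofList (b.map (fun t => (t.1, t.2.1)))
  let wild2 := PySem.Set.ofList ((b.filter (fun t => t.2.2 == "**")).map (fun t => (t.1, t.2.1)))
  let pairs12 := PySem.Set.ofList b
  disjointAltGo keys wild1 pairs1 wild2 pairs12 a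

-- ===== PRECONDITION & SPEC =====
def Spec_disjoint (a : List (String × String × String)) (b : List (String × String × String)) (out : Bool) : Prop := out = disjoint_alt a b
instance (a : List (String × String × String)) (b : List (String × String × String)) (out : Bool) : Decidable (Spec_disjoint a b out) := by unfold Spec_disjoint; infer_instance

-- ===== CLAIM (what is proved, stated in full; the proofs are below) =====
def Claim_equal_disjoint : Prop := ∀ (a : List (String × String × String)) (b : List (String × String × String)), Dom_disjoint a b → Spec_disjoint a b (disjoint a b)

-- ===== LEMMAS AND PROOFS =====

-- a single conflicting pair, as A's branch structure decides it
def conflict (t1 t2 : String × String × String) : Bool :=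
  (t1.1 == t2.1) &&
    (((t1.2.1 == "**" || t2.2.1 == "**") && t1.1 != "B19")
      || ((t1.2.1 == t2.2.1) && ((t1.2.2 == "**" || t2.2.2 == "**") || t1.2.2 == t2.2.2)))

lemma disjointInner_eq (t1 : String × String × String) (b : List (String × String × String)) :
    disjointInner t1 b = b.all (fun t2 => !conflict t1 t2) := by
  induction b with
  | nil => rfl
  | cons t2 bs ih =>
    rw [List.all_cons, ← ih]
    simp only [disjointInner, conflict]
    split_ifs with h1 h2 h3 h4 h5 <;> simp [conflict, *]

lemma disjoint_eq (a b : List (String × String × String)) :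
    disjoint a b = a.all (fun t1 => b.all (fun t2 => !conflict t1 t2)) := by
  induction a with
  | nil => rfl
  | cons t1 as_ ih =>
    simp only [disjoint, List.all_cons, ← disjointInner_eq, ih]
    split_ifs with h <;> simp [h]

set_option maxHeartbeats 1000000 in
lemma cond_eq (f0 f1 f2 : String) (b : List (String × String × String)) :
    ((PySem.Set.contains (PySem.Set.ofList (b.map (fun t => t.1))) f0 && f0 != "B19" &&
        (f1 == "**" ||
          PySem.Set.contains (PySem.Set.ofList ((b.filter (fun t => t.2.1 == "**")).map (fun t => t.1))) f0))
      || (PySem.Set.contains (PySem.Set.ofList (b.map (fun t => (t.1, t.2.1)))) (f0, f1) &&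
        (f2 == "**" ||
          PySem.Set.contains (PySem.Set.ofList ((b.filter (fun t => t.2.2 == "**")).map (fun t => (t.1, t.2.1)))) (f0, f1) ||
          PySem.Set.contains (PySem.Set.ofList b) (f0, f1, f2))))
    = b.any (fun t2 => conflict (f0, f1, f2) t2) := by
  rw [Bool.eq_iff_iff]
  simp only [Bool.or_eq_true, Bool.and_eq_true, PySem.Set.contains_iff, PySem.Set.mem_ofList,
    List.mem_map, List.mem_filter, List.any_eq_true, conflict, beq_iff_eq, bne_iff_ne, ne_eq]
  constructor
  · intro h
    aesop
  · intro h
    aesop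

lemma all_not_any (c : String × String × String → Bool) (b : List (String × String × String)) :
    b.all (fun t2 => !c t2) = !b.any c := by
  rw [List.all_eq_not_any_not]
  simp only [Bool.not_not]

lemma disjoint_alt_eq (a b : List (String × String × String)) :
    disjoint_alt a b = a.all (fun t1 => b.all (fun t2 => !conflict t1 t2)) := by
  show disjointAltGo _ _ _ _ _ a = _
  induction a with
  | nil => rfl
  | cons t1 as_ ih =>
    obtain ⟨f0, f1, f2⟩ := t1
    simp only [disjointAltGo, List.all_cons, ih]
    rw [all_not_any (fun t2 => conflict (f0, f1, f2) t2) b, ← cond_eq f0 f1 f2 b]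
    split_ifs with h1 h2
    · rw [h1]
      simp only [Bool.true_or, Bool.not_true, Bool.false_and]
    · rw [h2]
      simp only [Bool.or_true, Bool.not_true, Bool.false_and]
    · rw [Bool.not_eq_true] at h1 h2
      rw [h1, h2]
      simp only [Bool.or_false, Bool.not_false, Bool.true_and]

-- ===== VERDICT (by name: the statement is the Claim_ definition above) =====
theorem disjoint_spec : Claim_equal_disjoint := by
  intro a b _
  show disjoint a b = disjoint_alt a b
  rw [disjoint_eq, disjoint_alt_eq]
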